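-- pv_equiv track=rewrite | github.com/camel-ai/gecko | benchmarks/bfcl/multi_turn/utils.py | is_subsequence_unordered
-- ===== SOURCE A (Python) =====
-- from typing import Any, List, Tuple, Dict
--
-- def is_subsequence_unordered(list1: list, list2: list) -> Tuple[bool, list]:
--     """
--     Check if all elements of list1 are present in list2, regardless of order.
--     Handles duplicates correctly.
--
--     Args:
--         list1: Expected elements
--         list2: List to check against
--
--     Returns:
--         Tuple of (is_subsequence, missing_items)
--     """
--     # Copy list2 to avoid modifying the original list
--     list2_copy = list2[:]
--
--     # Check each item in list1 to see if it exists in list2_copy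
--     missing_elements = []
--     for item in list1:
--         try:
--             # Attempt to remove one occurrence of item from list2_copy
--             list2_copy.remove(item)
--         except ValueError:
--             # If item is not found, add it to missing_elements
--             missing_elements.append(item)
--
--     # If there are missing elements, list1 is not a subsequence of list2
--     is_subsequence = len(missing_elements) == 0
--     return is_subsequence, missing_elements
-- ===== SOURCE B (Python) =====
-- def is_subsequence_unordered(list1, list2):
--     # Stateless characterization instead of destructive removal: the element at
--     # position i of list1 is missing exactly when its occurrence number within
--     # list1[:i+1] exceeds its total number of occurrences in list2.
--     missing = [x for i, x in enumerate(list1)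
--                if list1[:i + 1].count(x) > list2.count(x)]
--     return (not missing, missing)
-- ===== Notes on version B (the rewrite author's own statement) =====
-- stated objective: alternative
-- what changed: Replaces A's stateful simulation (destructively removing matched items from a copy of list2) by a stateless comprehension that classifies each position of list1 directly via the occurrence-count characterization: the k-th occurrence of x is missing iff list2 holds fewer than k occurrences of x.
import Mathlib
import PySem

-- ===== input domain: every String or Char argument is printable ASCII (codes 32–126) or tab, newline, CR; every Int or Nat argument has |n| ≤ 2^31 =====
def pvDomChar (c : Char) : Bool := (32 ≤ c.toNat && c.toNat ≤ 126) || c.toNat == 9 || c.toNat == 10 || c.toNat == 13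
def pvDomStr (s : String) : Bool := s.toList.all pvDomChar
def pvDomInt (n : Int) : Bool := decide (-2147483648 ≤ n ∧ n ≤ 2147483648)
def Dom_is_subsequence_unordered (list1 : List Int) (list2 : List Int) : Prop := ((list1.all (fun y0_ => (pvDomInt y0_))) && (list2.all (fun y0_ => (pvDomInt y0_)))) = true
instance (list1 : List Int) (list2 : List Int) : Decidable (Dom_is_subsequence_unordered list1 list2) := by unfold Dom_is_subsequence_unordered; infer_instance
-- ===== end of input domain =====

-- B replaces A's destructive removal loop by a stateless occurrence-count comprehension (objective: alternative, not faster).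

-- ===== PORT A =====
-- state: (list2_copy, missing_elements); `remove` raising ValueError = remove? returning none
def is_subsequence_unordered (list1 : List Int) (list2 : List Int) : Bool × List Int :=
  let s := list1.foldl (fun (s : List Int × List Int) item =>
    match PySem.List.remove? s.1 item with
    | some l => (l, s.2)
    | none => (s.1, s.2 ++ [item])) (list2, [])
  ((s.2.length == 0 : Bool), s.2)

-- ===== PORT B =====
-- comprehension over enumerate(list1); list1[:i+1] = slice, .count = PySem.List.count
def is_subsequence_unordered_alt (list1 : List Int) (list2 : List Int) : Bool × List Int :=
  let missing := ((PySem.List.enumerate list1).filter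
      (fun p => PySem.List.count (PySem.List.slice list1 none (some (p.1 + 1))) p.2
                > PySem.List.count list2 p.2)).map (fun p => p.2)
  (missing.isEmpty, missing)

-- ===== PRECONDITION & SPEC =====
def Spec_is_subsequence_unordered (list1 : List Int) (list2 : List Int) (out : Bool × List Int) : Prop := out = is_subsequence_unordered_alt list1 list2
instance (list1 : List Int) (list2 : List Int) (out : Bool × List Int) : Decidable (Spec_is_subsequence_unordered list1 list2 out) := by unfold Spec_is_subsequence_unordered; infer_instance

-- ===== CLAIM =====
def Claim_equal_is_subsequence_unordered : Prop := ∀ (list1 : List Int) (list2 : List Int), Dom_is_subsequence_unordered list1 list2 → Spec_is_subsequence_unordered list1 list2 (is_subsequence_unordered list1 list2)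

-- ===== LEMMAS AND PROOFS =====

-- reference function both ports are reduced to
def pvSpec : List Int → List Int → List Int
  | [], _ => []
  | x :: xs, l2 => if x ∈ l2 then pvSpec xs (l2.erase x) else x :: pvSpec xs l2

theorem pv_a_side (list1 : List Int) :
    ∀ (l2 miss : List Int),
    (list1.foldl (fun (s : List Int × List Int) item =>
      match PySem.List.remove? s.1 item with
      | some l => (l, s.2)
      | none => (s.1, s.2 ++ [item])) (l2, miss)).2 = miss ++ pvSpec list1 l2 := by
  induction list1 with
  | nil => intro l2 miss; simp [pvSpec]
  | cons x xs ih =>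
    intro l2 miss
    by_cases hx : x ∈ l2
    · rw [List.foldl_cons]
      simp only [PySem.List.remove?_eq_some_erase l2 x hx]
      rw [ih, pvSpec, if_pos hx]
    · rw [List.foldl_cons]
      simp only [(PySem.List.remove?_eq_none_iff l2 x).mpr hx]
      rw [ih, pvSpec, if_neg hx]
      simp

theorem pv_b_side (list2 : List Int) (full : List Int) :
    ∀ (xs pre l2 : List Int), full = pre ++ xs →
    (∀ x, List.count x l2 = List.count x list2 - List.count x pre) →
    ((PySem.List.enumerate xs (pre.length : Int)).filter
      (fun p => PySem.List.count (PySem.List.slice full none (some (p.1 + 1))) p.2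
                > PySem.List.count list2 p.2)).map (fun p => p.2) = pvSpec xs l2 := by
  intro xs
  induction xs with
  | nil => intro pre l2 _ _; simp [PySem.List.enumerate, pvSpec]
  | cons x rest ih =>
    intro pre l2 hfull hinv
    rw [PySem.List.enumerate_cons]
    have hsl : PySem.List.slice full none (some ((pre.length : Int) + 1))
        = List.take (pre.length + 1) full := by
      have : ((pre.length : Int) + 1) = ((pre.length + 1 : ℕ) : Int) := by push_cast; ring
      rw [this, PySem.List.slice_to_natCast]
    have htake : List.take (pre.length + 1) full = pre ++ [x] := by
      subst hfull
      rw [List.take_append]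
      simp
    have hcond : PySem.List.count (PySem.List.slice full none (some ((pre.length : Int) + 1))) x
        = List.count x pre + 1 := by
      rw [hsl, htake, PySem.List.count_eq]
      simp
    have hc2 : PySem.List.count list2 x = List.count x list2 := PySem.List.count_eq _ _
    have hstart : (pre.length : Int) + 1 = (((pre ++ [x]).length : ℕ) : Int) := by
      simp
    by_cases hx : x ∈ l2
    · have hpos : 0 < List.count x l2 := List.count_pos_iff.mpr hx
      have hlt : List.count x pre < List.count x list2 := by
        have := hinv x; omega
      rw [List.filter_cons_of_neg (by simp only [hcond, hc2, decide_eq_true_eq]; omega)]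
      rw [pvSpec, if_pos hx, hstart]
      apply ih (pre ++ [x]) (l2.erase x)
      · subst hfull; simp
      · intro y
        have h1 := hinv y
        by_cases hy : y = x
        · subst hy
          rw [List.count_erase_self]
          have h2 : List.count y (pre ++ [y]) = List.count y pre + 1 := by
            simp [List.count_append]
          omega
        · rw [List.count_erase_of_ne hy]
          have h2 : List.count y (pre ++ [x]) = List.count y pre := by
            simp [List.count_append, List.count_cons]
            exact fun h => hy h.symm
          omega
    · have hz : List.count x l2 = 0 := List.count_eq_zero_of_not_mem hx
      have hle : List.count x list2 ≤ List.count x pre := by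
        have := hinv x; omega
      rw [List.filter_cons_of_pos (by simp only [hcond, hc2, decide_eq_true_eq]; omega)]
      rw [List.map_cons, pvSpec, if_neg hx, hstart]
      congr 1
      apply ih (pre ++ [x]) l2
      · subst hfull; simp
      · intro y
        have h1 := hinv y
        by_cases hy : y = x
        · subst hy
          have h2 : List.count y (pre ++ [y]) = List.count y pre + 1 := by
            simp [List.count_append]
          omega
        · have h2 : List.count y (pre ++ [x]) = List.count y pre := by
            simp [List.count_append, List.count_cons]
            exact fun h => hy h.symm
          omega

-- ===== VERDICT =====
theorem is_subsequence_unordered_spec : Claim_equal_is_subsequence_unordered := by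
  intro list1 list2 _
  unfold Spec_is_subsequence_unordered is_subsequence_unordered is_subsequence_unordered_alt
  have ha := pv_a_side list1 list2 []
  have hb := pv_b_side list2 list1 list1 [] list2 (by simp) (by intro x; simp)
  simp only [List.nil_append] at ha
  simp only [List.length_nil, Int.natCast_zero] at hb
  simp only [ha, hb]
  cases pvSpec list1 list2 with
  | nil => simp
  | cons a l => simp
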